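-- pv_equiv track=rewrite | github.com/ShimShining/wheat | race/prac/interview/str_sort.py | str_sort
-- ===== SOURCE A (Python) =====
-- def str_sort(s):
--
--     r_s = ""
--     g_s = ""
--     b_s = ""
--     for item in s:
--         if item == "R":
--             r_s += item
--         elif item == "G":
--             g_s += item
--         else:
--             b_s += item
--
--     return r_s + g_s + b_s
-- ===== SOURCE B (Python) =====
-- def str_sort(s):
--     return ''.join(sorted(s, key=lambda c: 0 if c == 'R' else (1 if c == 'G' else 2)))
-- ===== Notes on version B (the rewrite author's own statement) =====
-- stated objective: idiomatic
-- what changed: Replaces the three manual string accumulators with a single stable key-sort (R before G before the rest) joined into a string.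
import Mathlib
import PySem

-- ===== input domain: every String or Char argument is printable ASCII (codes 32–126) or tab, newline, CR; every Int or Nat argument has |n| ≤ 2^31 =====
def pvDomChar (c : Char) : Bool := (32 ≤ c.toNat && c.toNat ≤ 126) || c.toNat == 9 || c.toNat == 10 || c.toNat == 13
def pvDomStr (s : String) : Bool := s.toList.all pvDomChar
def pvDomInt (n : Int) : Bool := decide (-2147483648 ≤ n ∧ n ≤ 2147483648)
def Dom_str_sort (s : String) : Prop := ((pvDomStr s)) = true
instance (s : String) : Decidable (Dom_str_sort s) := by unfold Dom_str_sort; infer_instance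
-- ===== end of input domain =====

-- B groups characters by a single stable key-sort instead of A's three manual accumulators (idiomatic; equal cost at these sizes).

-- ===== PORT A =====
-- one loop over s with three string accumulators r_s, g_s, b_s (strings as List Char)
def str_sort (s : String) : String :=
  let t := s.toList.foldl
    (fun (acc : List Char × List Char × List Char) c =>
      if c = 'R' then (acc.1 ++ [c], acc.2.1, acc.2.2)
      else if c = 'G' then (acc.1, acc.2.1 ++ [c], acc.2.2)
      else (acc.1, acc.2.1, acc.2.2 ++ [c]))
    ([], [], [])
  String.ofList (t.1 ++ t.2.1 ++ t.2.2)

-- ===== PORT B =====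
-- key=lambda c: 0 if c == 'R' else (1 if c == 'G' else 2)
def sortKey (c : Char) : Nat := if c = 'R' then 0 else if c = 'G' then 1 else 2

-- ''.join(sorted(s, key=sortKey))
def str_sort_alt (s : String) : String :=
  String.ofList (PySem.List.sorted s.toList sortKey false)

-- ===== PRECONDITION & SPEC =====
def Spec_str_sort (s : String) (out : String) : Prop := out = str_sort_alt s
instance (s : String) (out : String) : Decidable (Spec_str_sort s out) := by unfold Spec_str_sort; infer_instance

-- ===== CLAIM (what is proved, stated in full; the proofs are below) =====
def Claim_equal_str_sort : Prop := ∀ (s : String), Dom_str_sort s → Spec_str_sort s (str_sort s)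

-- ===== LEMMAS AND PROOFS =====

-- inserting x before the first strictly larger key lands exactly at the end of its bucket
theorem insertBy_grouped (x : Char) (p q : List Char)
    (hp : ∀ y ∈ p, sortKey y ≤ sortKey x) (hq : ∀ y ∈ q, sortKey x < sortKey y) :
    PySem.List.insertBy (fun a b => decide (sortKey a < sortKey b)) x (p ++ q)
      = p ++ [x] ++ q := by
  induction p with
  | nil =>
    cases q with
    | nil => rfl
    | cons y ys =>
      simp [PySem.List.insertBy, hq y (by simp)]
  | cons z zs ih =>
    have hz : ¬ sortKey x < sortKey z := by
      have := hp z (by simp)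
      omega
    simp [PySem.List.insertBy, hz, ih (fun y hy => hp y (by simp [hy]))]

-- the insertion-sort loop keeps the three buckets, each extended by its filter
theorem sorted_buckets (l : List Char) (g0 g1 g2 : List Char)
    (h0 : ∀ y ∈ g0, sortKey y = 0) (h1 : ∀ y ∈ g1, sortKey y = 1) (h2 : ∀ y ∈ g2, sortKey y = 2) :
    l.foldl (fun acc x => PySem.List.insertBy (fun a b => decide (sortKey a < sortKey b)) x acc)
        (g0 ++ g1 ++ g2)
      = (g0 ++ l.filter (fun c => sortKey c = 0))
        ++ (g1 ++ l.filter (fun c => sortKey c = 1))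
        ++ (g2 ++ l.filter (fun c => sortKey c = 2)) := by
  induction l generalizing g0 g1 g2 with
  | nil => simp
  | cons x xs ih =>
    rcases hk : sortKey x with _ | _ | k
    · -- key 0: insert at end of g0
      have hins : PySem.List.insertBy (fun a b => decide (sortKey a < sortKey b)) x
          ((g0 ++ g1) ++ g2) = (g0 ++ [x]) ++ (g1 ++ g2) := by
        have := insertBy_grouped x g0 (g1 ++ g2)
          (fun y hy => by rw [h0 y hy, hk])
          (fun y hy => by
            rw [hk]; rcases List.mem_append.1 hy with h | h
            · rw [h1 y h]; omega
            · rw [h2 y h]; omega)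
        simpa using this
      have := ih (g0 ++ [x]) g1 g2
        (fun y hy => by rcases List.mem_append.1 hy with h | h
                        · exact h0 y h
                        · simp at h; subst h; exact hk) h1 h2
      simp only [List.foldl_cons]
      rw [show (g0 ++ g1 ++ g2) = (g0 ++ g1) ++ g2 from rfl] at hins ⊢
      rw [hins]
      rw [show (g0 ++ [x]) ++ (g1 ++ g2) = (g0 ++ [x]) ++ g1 ++ g2 by simp] at *
      rw [this]
      simp [hk]
    · -- key 1: insert at end of g1
      have hins : PySem.List.insertBy (fun a b => decide (sortKey a < sortKey b)) x
          ((g0 ++ g1) ++ g2) = (g0 ++ g1 ++ [x]) ++ g2 := by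
        have := insertBy_grouped x (g0 ++ g1) g2
          (fun y hy => by
            rw [hk]; rcases List.mem_append.1 hy with h | h
            · rw [h0 y h]; omega
            · rw [h1 y h])
          (fun y hy => by rw [hk, h2 y hy]; omega)
        simpa using this
      have := ih g0 (g1 ++ [x]) g2 h0
        (fun y hy => by rcases List.mem_append.1 hy with h | h
                        · exact h1 y h
                        · simp at h; subst h; exact hk) h2
      simp only [List.foldl_cons]
      rw [show (g0 ++ g1 ++ g2) = (g0 ++ g1) ++ g2 from rfl, hins,
          show (g0 ++ g1 ++ [x]) ++ g2 = g0 ++ (g1 ++ [x]) ++ g2 by simp, this]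
      simp [hk]
    · -- key 2 (= other): insert at the very end
      have hk2 : sortKey x = 2 := by
        unfold sortKey at hk ⊢; split_ifs at hk ⊢ <;> omega
      have hins : PySem.List.insertBy (fun a b => decide (sortKey a < sortKey b)) x
          ((g0 ++ g1 ++ g2) ++ []) = (g0 ++ g1 ++ g2) ++ [x] ++ [] := by
        exact insertBy_grouped x (g0 ++ g1 ++ g2) []
          (fun y hy => by
            rw [hk2]
            rcases List.mem_append.1 hy with h | h
            · rcases List.mem_append.1 h with h' | h'
              · rw [h0 y h']; omega
              · rw [h1 y h']; omega
            · rw [h2 y h])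
          (fun y hy => by simp at hy)
      simp only [List.append_nil] at hins
      have := ih g0 g1 (g2 ++ [x]) h0 h1
        (fun y hy => by rcases List.mem_append.1 hy with h | h
                        · exact h2 y h
                        · simp at h; subst h; exact hk2)
      simp only [List.foldl_cons]
      rw [hins, show (g0 ++ g1 ++ g2) ++ [x] = g0 ++ g1 ++ (g2 ++ [x]) by simp, this]
      simp [hk2]

-- A's loop: three independent filter-accumulators
theorem strA_loop (l : List Char) (a b c : List Char) :
    l.foldl (fun (acc : List Char × List Char × List Char) x =>
      if x = 'R' then (acc.1 ++ [x], acc.2.1, acc.2.2)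
      else if x = 'G' then (acc.1, acc.2.1 ++ [x], acc.2.2)
      else (acc.1, acc.2.1, acc.2.2 ++ [x])) (a, b, c)
    = (a ++ l.filter (fun x => sortKey x = 0),
       b ++ l.filter (fun x => sortKey x = 1),
       c ++ l.filter (fun x => sortKey x = 2)) := by
  induction l generalizing a b c with
  | nil => simp
  | cons x xs ih =>
    by_cases hR : x = 'R'
    · simp [List.foldl_cons, hR, ih, sortKey]
    · by_cases hG : x = 'G'
      · simp [List.foldl_cons, hG, ih, sortKey]
      · simp [List.foldl_cons, hR, hG, ih, sortKey]

-- ===== VERDICT (by name: the statement is the Claim_ definition above) =====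
theorem str_sort_spec : Claim_equal_str_sort := by
  intro s _
  unfold Spec_str_sort str_sort str_sort_alt
  rw [PySem.List.sorted_eq_foldl_insertBy]
  have hb := sorted_buckets s.toList [] [] [] (by simp) (by simp) (by simp)
  simp only [List.nil_append, List.append_nil] at hb
  rw [hb, strA_loop]
  simp
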